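-- pv_equiv track=rewrite | github.com/mosheohana/chords | chord_detector_basic.py | collapse_duplicate_ranges
-- ===== SOURCE A (Python) =====
-- def collapse_duplicate_ranges(ranges):
--     collapsed = []
--     for start, end, chord in ranges:
--         if collapsed and collapsed[-1][2] == chord:
--             prev_start, _prev_end, prev_chord = collapsed[-1]
--             collapsed[-1] = (prev_start, end, prev_chord)
--         else:
--             collapsed.append((start, end, chord))
--
--     return collapsed
-- ===== SOURCE B (Python) =====
-- def collapse_duplicate_ranges(ranges):
--     items = list(ranges)
--     out = []
--     i, n = 0, len(items)
--     while i < n: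
--         start, _end, chord = items[i]
--         j = i + 1
--         while j < n and items[j][2] == chord:
--             j += 1
--         out.append((start, items[j - 1][1], chord))
--         i = j
--     return out
-- ===== Notes on version B (the rewrite author's own statement) =====
-- stated objective: alternative
-- what changed: B scans each maximal run of consecutive equal-chord ranges with a second index and emits one tuple (first start, last end, chord) per run, instead of A's repeated in-place rewriting of the last element of the output list.
import Mathlib
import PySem

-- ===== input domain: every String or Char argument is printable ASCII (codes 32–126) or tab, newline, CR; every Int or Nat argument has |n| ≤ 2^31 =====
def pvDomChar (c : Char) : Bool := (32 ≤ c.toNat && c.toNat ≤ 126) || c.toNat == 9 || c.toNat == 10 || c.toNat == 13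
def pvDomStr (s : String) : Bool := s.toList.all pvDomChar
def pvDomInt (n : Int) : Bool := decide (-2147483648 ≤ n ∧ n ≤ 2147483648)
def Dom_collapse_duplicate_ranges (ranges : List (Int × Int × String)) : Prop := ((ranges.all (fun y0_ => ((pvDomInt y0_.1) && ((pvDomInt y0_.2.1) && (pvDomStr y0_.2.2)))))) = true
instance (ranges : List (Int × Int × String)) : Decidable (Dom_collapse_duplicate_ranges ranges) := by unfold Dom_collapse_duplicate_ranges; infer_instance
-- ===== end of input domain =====

-- B replaces A's in-place rewriting of the last output element by a run-scan: one output tuple per maximal run of equal-chord ranges (alternative decomposition, same cost).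


-- ===== PORT A =====
-- one loop iteration: merge into the last collapsed element if the chord matches, else append
def cdrStep (collapsed : List (Int × Int × String)) (x : Int × Int × String) : List (Int × Int × String) :=
  match collapsed.getLast? with
  | some (ps, _pe, pc) =>
      if pc == x.2.2 then collapsed.dropLast ++ [(ps, x.2.1, pc)]
      else collapsed ++ [x]
  | none => collapsed ++ [x]

def collapse_duplicate_ranges (ranges : List (Int × Int × String)) : List (Int × Int × String) :=
  ranges.foldl cdrStep []

-- ===== PORT B =====
-- Source B's single left-to-right scan: carry the current run's (start, last end, chord), emit one tuple when the chord changes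
def cdrRun (s e : Int) (c : String) : List (Int × Int × String) → List (Int × Int × String)
  | [] => [(s, e, c)]
  | (xs, xe, xc) :: rest =>
      if xc == c then cdrRun s xe c rest
      else (s, e, c) :: cdrRun xs xe xc rest

def collapse_duplicate_ranges_alt (ranges : List (Int × Int × String)) : List (Int × Int × String) :=
  match ranges with
  | [] => []
  | (s, e, c) :: rest => cdrRun s e c rest

-- ===== PRECONDITION & SPEC =====
def Spec_collapse_duplicate_ranges (ranges : List (Int × Int × String)) (out : List (Int × Int × String)) : Prop := out = collapse_duplicate_ranges_alt ranges
instance (ranges : List (Int × Int × String)) (out : List (Int × Int × String)) : Decidable (Spec_collapse_duplicate_ranges ranges out) := by unfold Spec_collapse_duplicate_ranges; infer_instance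

-- ===== CLAIM (what is proved, stated in full; the proofs are below) =====
def Claim_equal_collapse_duplicate_ranges : Prop := ∀ (ranges : List (Int × Int × String)), Dom_collapse_duplicate_ranges ranges → Spec_collapse_duplicate_ranges ranges (collapse_duplicate_ranges ranges)

-- ===== LEMMAS AND PROOFS =====

-- A's step never touches anything but the last element, so a nonempty prefix factors out
theorem cdrStep_append (acc : List (Int × Int × String)) (p x : Int × Int × String) :
    cdrStep (acc ++ [p]) x = acc ++ cdrStep [p] x := by
  obtain ⟨ps, pe, pc⟩ := p
  simp [cdrStep]
  split <;> simp

theorem foldl_cdrStep_append (l : List (Int × Int × String)) (acc : List (Int × Int × String))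
    (p : Int × Int × String) :
    l.foldl cdrStep (acc ++ [p]) = acc ++ l.foldl cdrStep [p] := by
  induction l generalizing acc p with
  | nil => simp
  | cons x rest ih =>
    simp only [List.foldl_cons, cdrStep_append]
    rcases h : cdrStep [p] x with _ | ⟨q, tl⟩
    · exfalso
      obtain ⟨ps, pe, pc⟩ := p
      simp [cdrStep] at h
      split at h <;> simp_all
    · rcases tl with _ | ⟨r, tl2⟩
      · exact ih acc q
      · rcases tl2 with _ | _
        · calc rest.foldl cdrStep (acc ++ [q, r])
              = rest.foldl cdrStep ((acc ++ [q]) ++ [r]) := by simp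
            _ = (acc ++ [q]) ++ rest.foldl cdrStep [r] := ih (acc ++ [q]) r
            _ = acc ++ ([q] ++ rest.foldl cdrStep [r]) := by simp
            _ = acc ++ rest.foldl cdrStep ([] ++ [q] ++ [r]) := by
                  rw [show ([] : List (Int × Int × String)) ++ [q] ++ [r] = [q] ++ [r] by simp,
                      ih [q] r]
        · exfalso
          obtain ⟨ps, pe, pc⟩ := p
          simp [cdrStep] at h
          split at h <;> simp_all
  -- the non-cons cases cannot occur: cdrStep on a singleton returns 1 or 2 elements

theorem cdrStep_singleton (s e : Int) (c : String) (x : Int × Int × String) :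
    cdrStep [(s, e, c)] x = if c == x.2.2 then [(s, x.2.1, c)] else [(s, e, c), x] := by
  simp [cdrStep]

-- the core invariant: starting A's fold from a singleton is B's run scan
theorem foldl_singleton_eq_run (l : List (Int × Int × String)) (s e : Int) (c : String) :
    l.foldl cdrStep [(s, e, c)] = cdrRun s e c l := by
  induction l generalizing s e c with
  | nil => simp [cdrRun]
  | cons x rest ih =>
    obtain ⟨xs, xe, xc⟩ := x
    rw [List.foldl_cons, cdrStep_singleton]
    by_cases hc : xc = c
    · subst hc
      rw [if_pos (by simp)]
      rw [ih s xe xc]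
      simp [cdrRun]
    · have hbc : (xc == c) = false := beq_eq_false_iff_ne.mpr hc
      have hcb : (c == xc) = false := beq_eq_false_iff_ne.mpr (fun h => hc (Eq.symm h))
      rw [if_neg (by simp [hcb])]
      rw [show ([(s, e, c), (xs, xe, xc)] : List (Int × Int × String))
            = [(s, e, c)] ++ [(xs, xe, xc)] from rfl,
          foldl_cdrStep_append rest [(s, e, c)] (xs, xe, xc),
          ih xs xe xc]
      simp [cdrRun, hbc]

-- ===== VERDICT (by name: the statement is the Claim_ definition above) =====
theorem collapse_duplicate_ranges_spec : Claim_equal_collapse_duplicate_ranges := by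
  intro ranges _
  unfold Spec_collapse_duplicate_ranges collapse_duplicate_ranges collapse_duplicate_ranges_alt
  cases ranges with
  | nil => rfl
  | cons x rest =>
    obtain ⟨s, e, c⟩ := x
    simp only [List.foldl_cons, cdrStep, List.getLast?_nil, List.nil_append]
    exact foldl_singleton_eq_run rest s e c
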